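-- pv_equiv track=rewrite | github.com/Hyeontae1112/toric_manifolds_with_Picard_number_4 | fan-giving maps/programs/Simplicial_Complex.py | Minimal_non_faces
-- ===== SOURCE A (Python) =====
-- from itertools import combinations, product, permutations
--
-- def Cpx_bin(K):
--     K2=[]
--     for k in K:
--         z=0
--         for i in k:
--             z=z+2**(i-1)
--         K2.append(z)
--     return K2
--
-- def Minimal_non_faces(cpx_bin, m, n, vert):
--     MNF = []
--     mnf_vector = [0]*n
--     for d in range(2, n+2):
--         C = combinations(vert, d)
--         for c in C:
--             nf = Cpx_bin([c])[0]
--             for mnf in MNF: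
--                 if mnf|nf == nf:
--                     break
--             else:
--                 for f in cpx_bin:
--                     if nf|f == f:
--                         break
--                 else:
--                     MNF.append(nf)
--                     mnf_vector[d-2] += 1
--     return MNF, mnf_vector
-- ===== SOURCE B (Python) =====
-- from itertools import combinations
--
-- def Minimal_non_faces(cpx_bin, m, n, vert):
--     # Phase 1: collect every non-face (with its size d) in enumeration order.
--     N = []
--     for d in range(2, n + 2):
--         for c in combinations(vert, d):
--             nf = sum(2 ** (i - 1) for i in c)
--             if all(nf | f != f for f in cpx_bin):
--                 N.append((nf, d))
--     # Phase 2: keep each non-face that no earlier non-face is contained in.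
--     MNF = []
--     mnf_vector = [0] * n
--     seen = []
--     for nf, d in N:
--         if all(p | nf != nf for p in seen):
--             MNF.append(nf)
--             mnf_vector[d - 2] += 1
--         seen.append(nf)
--     return MNF, mnf_vector
-- ===== Notes on version B (the rewrite author's own statement) =====
-- stated objective: alternative
-- what changed: A interleaves the minimality test against the incrementally-kept MNF list with the face test; B first builds the full list N of all non-faces in enumeration order and then, in a separate selection pass, keeps each non-face that no earlier non-face is contained in.
-- outside the precondition, e.g. on Minimal_non_faces([3], 0, 2, [0, 2, 5]): A raises TypeError, B raises TypeError; on Minimal_non_faces([], 0, 1, [-1, 3]): A returns ([4.25], [1]), B returns ([4.25], [1])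
import Mathlib
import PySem

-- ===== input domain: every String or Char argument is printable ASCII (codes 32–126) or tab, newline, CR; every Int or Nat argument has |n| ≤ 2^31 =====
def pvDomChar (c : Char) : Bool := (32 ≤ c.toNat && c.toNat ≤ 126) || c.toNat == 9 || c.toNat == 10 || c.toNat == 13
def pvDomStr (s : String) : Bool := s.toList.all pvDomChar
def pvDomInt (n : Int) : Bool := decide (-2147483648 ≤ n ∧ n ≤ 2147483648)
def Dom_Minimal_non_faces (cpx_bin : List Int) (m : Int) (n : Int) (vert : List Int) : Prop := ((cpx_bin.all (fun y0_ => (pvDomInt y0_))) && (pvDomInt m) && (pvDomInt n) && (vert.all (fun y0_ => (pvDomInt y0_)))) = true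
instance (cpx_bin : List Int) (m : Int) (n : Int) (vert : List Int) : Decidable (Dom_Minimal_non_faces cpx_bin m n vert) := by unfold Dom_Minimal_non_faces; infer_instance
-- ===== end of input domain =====

-- B replaces A's interleaved "skip supersets of already-kept minimal non-faces" by two phases:
-- first list ALL non-faces in enumeration order, then keep each one that no earlier non-face
-- is contained in (objective: alternative decomposition, same cost).

-- ===== PORT A =====
-- itertools.combinations(l, k) in Python's order (combinations of positions, lexicographic)
def pvCombos (k : Nat) (l : List Int) : List (List Int) :=
  match k, l with
  | 0, _ => [[]]
  | _+1, [] => []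
  | k+1, x::xs => (pvCombos k xs).map (fun c => x :: c) ++ pvCombos (k+1) xs

-- helper Cpx_bin: z = z + 2**(i-1); exact for i ≥ 1 (Pre_ guarantees this; Python leaves int there)
def pvCpxBin (K : List (List Int)) : List Int :=
  K.foldl (fun K2 k => K2 ++ [k.foldl (fun z i => z + 2 ^ (i - 1).toNat) 0]) []

def Minimal_non_faces (cpx_bin : List Int) (m : Int) (n : Int) (vert : List Int) : List Int × List Int :=
  (PySem.List.pyRange 2 (n + 2) 1).foldl
    (fun st d =>
      (pvCombos d.toNat vert).foldl
        (fun st c =>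
          let nf := (pvCpxBin [c]).headD 0  -- Cpx_bin([c])[0]: index 0 of a one-element list; exact
          if st.1.any (fun mnf => PySem.Int.bor mnf nf == nf) then st
          else if cpx_bin.any (fun f => PySem.Int.bor nf f == f) then st
          else (st.1 ++ [nf], st.2.modify (d - 2).toNat (fun x => x + 1)))
        st)
    ([], List.replicate n.toNat 0)

-- ===== PORT B =====
def Minimal_non_faces_alt (cpx_bin : List Int) (m : Int) (n : Int) (vert : List Int) : List Int × List Int :=
  -- Phase 1: N = all non-faces with their size d, in enumeration order
  let N : List (Int × Int) :=
    (PySem.List.pyRange 2 (n + 2) 1).foldl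
      (fun acc d =>
        (pvCombos d.toNat vert).foldl
          (fun acc c =>
            let nf := c.foldl (fun z i => z + 2 ^ (i - 1).toNat) 0  -- sum(2**(i-1) for i in c); exact for i ≥ 1
            if cpx_bin.all (fun f => PySem.Int.bor nf f != f) then acc ++ [(nf, d)] else acc)
          acc)
      []
  -- Phase 2: keep each non-face no earlier non-face is contained in
  let r :=
    N.foldl
      (fun st p =>
        if st.2.2.all (fun q => PySem.Int.bor q p.1 != p.1) then
          (st.1 ++ [p.1], st.2.1.modify (p.2 - 2).toNat (fun x => x + 1), st.2.2 ++ [p.1])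
        else (st.1, st.2.1, st.2.2 ++ [p.1]))
      ([], List.replicate n.toNat 0, [])
  (r.1, r.2.1)

-- ===== PRECONDITION & SPEC =====
-- Pre_ excludes inputs on which some enumerated combination contains a vertex v ≤ 0: there Python A
-- computes 2**(v-1) as a float and either raises TypeError on `|` or returns floats (not ints).
def Pre_Minimal_non_faces (cpx_bin : List Int) (m : Int) (n : Int) (vert : List Int) : Prop :=
  (∀ v ∈ vert, 1 ≤ v) ∨ n ≤ 0 ∨ vert.length ≤ 1
instance (cpx_bin : List Int) (m : Int) (n : Int) (vert : List Int) : Decidable (Pre_Minimal_non_faces cpx_bin m n vert) := by unfold Pre_Minimal_non_faces; infer_instance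

def pvWitness_Minimal_non_faces : List Int × Int × Int × List Int := ([3, 5], 0, 2, [1, 2, 3])

def Spec_Minimal_non_faces (cpx_bin : List Int) (m : Int) (n : Int) (vert : List Int) (out : List Int × List Int) : Prop := out = Minimal_non_faces_alt cpx_bin m n vert
instance (cpx_bin : List Int) (m : Int) (n : Int) (vert : List Int) (out : List Int × List Int) : Decidable (Spec_Minimal_non_faces cpx_bin m n vert out) := by unfold Spec_Minimal_non_faces; infer_instance

-- ===== CLAIM (what is proved, stated in full; the proofs are below) =====
def Claim_equal_Minimal_non_faces : Prop := ∀ (cpx_bin : List Int) (m : Int) (n : Int) (vert : List Int), Dom_Minimal_non_faces cpx_bin m n vert → Pre_Minimal_non_faces cpx_bin m n vert → Spec_Minimal_non_faces cpx_bin m n vert (Minimal_non_faces cpx_bin m n vert)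

-- ===== LEMMAS AND PROOFS =====

-- the bitmask of a combination
def pvMask (c : List Int) : Int := c.foldl (fun z i => z + 2 ^ (i - 1).toNat) 0

-- "a is a subset of b" on bitmasks
def pvSub (a b : Int) : Prop := PySem.Int.bor a b = b

-- the flattened iteration sequence both ports traverse: (mask, d) pairs
def pvPairs (n : Int) (vert : List Int) : List (Int × Int) :=
  (PySem.List.pyRange 2 (n + 2) 1).flatMap
    (fun d => (pvCombos d.toNat vert).map (fun c => (pvMask c, d)))

def pvStepA (cpx : List Int) (st : List Int × List Int) (p : Int × Int) : List Int × List Int :=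
  if st.1.any (fun mnf => PySem.Int.bor mnf p.1 == p.1) then st
  else if cpx.any (fun f => PySem.Int.bor p.1 f == f) then st
  else (st.1 ++ [p.1], st.2.modify (p.2 - 2).toNat (fun x => x + 1))

def pvStepB (cpx : List Int) (st : List Int × List Int × List Int) (p : Int × Int) :
    List Int × List Int × List Int :=
  if cpx.all (fun f => PySem.Int.bor p.1 f != f) then
    (if st.2.2.all (fun q => PySem.Int.bor q p.1 != p.1) then
      (st.1 ++ [p.1], st.2.1.modify (p.2 - 2).toNat (fun x => x + 1), st.2.2 ++ [p.1])
    else (st.1, st.2.1, st.2.2 ++ [p.1]))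
  else st

def pvInv (MNF seen : List Int) : Prop :=
  (∀ x ∈ MNF, x ∈ seen) ∧ (∀ p ∈ seen, ∃ x ∈ MNF, pvSub x p) ∧ (∀ p ∈ seen, 0 ≤ p)

lemma pvMask_nonneg_aux (c : List Int) : ∀ z : Int, 0 ≤ z →
    0 ≤ c.foldl (fun z i => z + 2 ^ (i - 1).toNat) z := by
  induction c with
  | nil => intro z hz; simpa using hz
  | cons a t ih => intro z hz; exact ih _ (by positivity)

lemma pvMask_nonneg (c : List Int) : 0 ≤ pvMask c := pvMask_nonneg_aux c 0 le_rfl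

lemma pvSub_refl {a : Int} (ha : 0 ≤ a) : pvSub a a := by
  unfold pvSub
  rw [PySem.Int.bor_of_nonneg ha ha, Nat.or_self, Int.toNat_of_nonneg ha]

lemma pvSub_trans {a b c : Int} (ha : 0 ≤ a) (hb : 0 ≤ b) (hc : 0 ≤ c)
    (h1 : pvSub a b) (h2 : pvSub b c) : pvSub a c := by
  unfold pvSub at *
  rw [PySem.Int.bor_of_nonneg ha hb] at h1
  rw [PySem.Int.bor_of_nonneg hb hc] at h2
  rw [PySem.Int.bor_of_nonneg ha hc]
  have h1' : a.toNat ||| b.toNat = b.toNat := by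
    have := congrArg Int.toNat h1; simpa using this
  have h2' : b.toNat ||| c.toNat = c.toNat := by
    have := congrArg Int.toNat h2; simpa using this
  rw [show a.toNat ||| c.toNat = c.toNat by
    calc a.toNat ||| c.toNat = a.toNat ||| (b.toNat ||| c.toNat) := by rw [h2']
    _ = (a.toNat ||| b.toNat) ||| c.toNat := (Nat.or_assoc _ _ _).symm
    _ = b.toNat ||| c.toNat := by rw [h1']
    _ = c.toNat := h2']
  exact Int.toNat_of_nonneg hc

lemma pvFoldl_flatMap {α β γ : Type} (l : List α) (g : α → List β) (f : γ → β → γ) (s : γ) :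
    (l.flatMap g).foldl f s = l.foldl (fun s a => (g a).foldl f s) s := by
  induction l generalizing s <;> simp [List.foldl_append, *]

lemma pvFoldl_fun_congr {α β : Type} (l : List α) (f g : β → α → β) (s : β)
    (h : ∀ b a, f b a = g b a) : l.foldl f s = l.foldl g s := by
  have : f = g := funext fun b => funext fun a => h b a
  rw [this]

lemma pvFoldl_filter {α β : Type} (l : List α) (p : α → Bool) (f : β → α → β) (s : β) :
    (l.filter p).foldl f s = l.foldl (fun s x => if p x then f s x else s) s := by
  induction l generalizing s with
  | nil => rfl
  | cons a t ih => by_cases h : p a <;> simp [h, ih]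

-- A written as a fold of pvStepA over the flattened sequence
lemma pvA_eq (cpx : List Int) (m n : Int) (vert : List Int) :
    Minimal_non_faces cpx m n vert
      = (pvPairs n vert).foldl (pvStepA cpx) ([], List.replicate n.toNat 0) := by
  unfold Minimal_non_faces pvPairs
  rw [pvFoldl_flatMap]
  apply pvFoldl_fun_congr
  intro st d
  rw [List.foldl_map]
  rfl

-- B written as a fold of pvStepB over the flattened sequence
lemma pvB_eq (cpx : List Int) (m n : Int) (vert : List Int) :
    Minimal_non_faces_alt cpx m n vert
      = (fun r => (r.1, r.2.1))
          ((pvPairs n vert).foldl (pvStepB cpx) ([], List.replicate n.toNat 0, [])) := by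
  unfold Minimal_non_faces_alt
  have e1 : (pvPairs n vert).foldl
      (fun acc p => if cpx.all (fun f => PySem.Int.bor p.1 f != f) then acc ++ [p] else acc)
      ([] : List (Int × Int))
      = (PySem.List.pyRange 2 (n + 2) 1).foldl
          (fun acc d =>
            (pvCombos d.toNat vert).foldl
              (fun acc c =>
                if cpx.all (fun f => PySem.Int.bor (c.foldl (fun z i => z + 2 ^ (i - 1).toNat) 0) f != f)
                then acc ++ [(c.foldl (fun z i => z + 2 ^ (i - 1).toNat) 0, d)] else acc)
              acc)
          ([] : List (Int × Int)) := by
    unfold pvPairs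
    rw [pvFoldl_flatMap]
    apply pvFoldl_fun_congr
    intro st d
    rw [List.foldl_map]
    rfl
  have h2 : ∀ (L : List (Int × Int)) (acc : List (Int × Int)),
      L.foldl (fun acc p => if cpx.all (fun f => PySem.Int.bor p.1 f != f) then acc ++ [p] else acc) acc
        = acc ++ L.filter (fun p => cpx.all (fun f => PySem.Int.bor p.1 f != f)) := by
    intro L
    induction L with
    | nil => simp
    | cons p t ih =>
      intro acc
      by_cases h : (cpx.all fun f => PySem.Int.bor p.1 f != f) = true
      · rw [List.foldl_cons, if_pos h, ih, List.filter_cons, if_pos h]; simp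
      · rw [List.foldl_cons, if_neg h, ih, List.filter_cons, if_neg h]
  have hN : (PySem.List.pyRange 2 (n + 2) 1).foldl
      (fun acc d =>
        (pvCombos d.toNat vert).foldl
          (fun acc c =>
            if cpx.all (fun f => PySem.Int.bor (c.foldl (fun z i => z + 2 ^ (i - 1).toNat) 0) f != f)
            then acc ++ [(c.foldl (fun z i => z + 2 ^ (i - 1).toNat) 0, d)] else acc)
          acc)
      ([] : List (Int × Int))
      = (pvPairs n vert).filter (fun p => cpx.all (fun f => PySem.Int.bor p.1 f != f)) :=
    e1.symm.trans ((h2 _ []).trans (by simp))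
  rw [hN]
  dsimp only
  rw [pvFoldl_filter]
  rfl

lemma pvMain (cpx : List Int) :
    ∀ (L : List (Int × Int)) (MNF vec seen : List Int),
      pvInv MNF seen → (∀ p ∈ L, 0 ≤ p.1) →
      L.foldl (pvStepA cpx) (MNF, vec)
        = (fun r => (r.1, r.2.1)) (L.foldl (pvStepB cpx) (MNF, vec, seen)) := by
  intro L
  induction L with
  | nil => intro MNF vec seen _ _; rfl
  | cons p t ih =>
    intro MNF vec seen hInv hpos
    obtain ⟨hsub, hcov, hnn⟩ := hInv
    have hp : 0 ≤ p.1 := hpos p (List.mem_cons_self ..)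
    have hface : (cpx.all fun f => PySem.Int.bor p.1 f != f)
        = !(cpx.any fun f => PySem.Int.bor p.1 f == f) := by
      simp [List.all_eq_not_any_not, bne]
    have htail : ∀ q ∈ t, 0 ≤ q.1 := fun q hq => hpos q (List.mem_cons_of_mem _ hq)
    simp only [List.foldl_cons]
    by_cases hf : (cpx.any fun f => PySem.Int.bor p.1 f == f) = true
    · -- p is a face: both steps leave the state unchanged
      have hfb : (cpx.all fun f => PySem.Int.bor p.1 f != f) = false := by
        rw [hface, hf]; rfl
      by_cases ha : (MNF.any fun mnf => PySem.Int.bor mnf p.1 == p.1) = true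
      · rw [show pvStepA cpx (MNF, vec) p = (MNF, vec) by simp [pvStepA, ha],
            show pvStepB cpx (MNF, vec, seen) p = (MNF, vec, seen) by simp [pvStepB, hfb]]
        exact ih MNF vec seen ⟨hsub, hcov, hnn⟩ htail
      · rw [show pvStepA cpx (MNF, vec) p = (MNF, vec) by
              simp [pvStepA, eq_false_of_ne_true ha, hf],
            show pvStepB cpx (MNF, vec, seen) p = (MNF, vec, seen) by simp [pvStepB, hfb]]
        exact ih MNF vec seen ⟨hsub, hcov, hnn⟩ htail
    · -- p is a non-face
      have hfb : (cpx.all fun f => PySem.Int.bor p.1 f != f) = true := by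
        rw [hface, eq_false_of_ne_true hf]; rfl
      by_cases ha : (MNF.any fun mnf => PySem.Int.bor mnf p.1 == p.1) = true
      · -- a kept minimal non-face is contained in p: both skip; B records p in seen
        obtain ⟨x, hx, hxs⟩ := List.any_eq_true.mp ha
        have hb : (seen.all fun q => PySem.Int.bor q p.1 != p.1) = false := by
          simp only [List.all_eq_false, bne_iff_ne, not_not]
          exact ⟨x, hsub x hx, beq_iff_eq.mp hxs⟩
        rw [show pvStepA cpx (MNF, vec) p = (MNF, vec) by simp [pvStepA, ha],
            show pvStepB cpx (MNF, vec, seen) p = (MNF, vec, seen ++ [p.1]) by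
              simp [pvStepB, hfb, hb]]
        apply ih MNF vec (seen ++ [p.1])
        · refine ⟨fun y hy => List.mem_append_left _ (hsub y hy), ?_, ?_⟩
          · intro q hq
            rcases List.mem_append.mp hq with h | h
            · exact hcov q h
            · simp only [List.mem_singleton] at h
              exact ⟨x, hx, h ▸ beq_iff_eq.mp hxs⟩
          · intro q hq
            rcases List.mem_append.mp hq with h | h
            · exact hnn q h
            · simp only [List.mem_singleton] at h; exact h ▸ hp
        · exact htail
      · -- no earlier non-face is contained in p: kept by both
        have hb : (seen.all fun q => PySem.Int.bor q p.1 != p.1) = true := by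
          simp only [List.all_eq_true, bne_iff_ne]
          intro q hq hc
          obtain ⟨x, hx, hxs⟩ := hcov q hq
          have hxp : pvSub x p.1 :=
            pvSub_trans (hnn x (hsub x hx)) (hnn q hq) hp hxs hc
          exact ha (List.any_eq_true.mpr ⟨x, hx, beq_iff_eq.mpr hxp⟩)
        rw [show pvStepA cpx (MNF, vec) p
              = (MNF ++ [p.1], vec.modify (p.2 - 2).toNat (fun x => x + 1)) by
              simp [pvStepA, eq_false_of_ne_true ha, hf],
            show pvStepB cpx (MNF, vec, seen) p
              = (MNF ++ [p.1], vec.modify (p.2 - 2).toNat (fun x => x + 1), seen ++ [p.1]) by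
              simp [pvStepB, hfb, hb]]
        apply ih
        · refine ⟨?_, ?_, ?_⟩
          · intro y hy
            rcases List.mem_append.mp hy with h | h
            · exact List.mem_append_left _ (hsub y h)
            · exact List.mem_append_right _ h
          · intro q hq
            rcases List.mem_append.mp hq with h | h
            · obtain ⟨x, hx, hxs⟩ := hcov q h
              exact ⟨x, List.mem_append_left _ hx, hxs⟩
            · simp only [List.mem_singleton] at h
              refine ⟨p.1, List.mem_append_right _ (List.mem_singleton_self _), ?_⟩
              rw [h]; exact pvSub_refl hp
          · intro q hq
            rcases List.mem_append.mp hq with h | h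
            · exact hnn q h
            · simp only [List.mem_singleton] at h; exact h ▸ hp
        · exact htail

lemma pvPairs_nonneg (n : Int) (vert : List Int) : ∀ p ∈ pvPairs n vert, 0 ≤ p.1 := by
  intro p hp
  unfold pvPairs at hp
  obtain ⟨d, _, hd⟩ := List.mem_flatMap.mp hp
  obtain ⟨c, _, hc⟩ := List.mem_map.mp hd
  rw [← hc]
  exact pvMask_nonneg c

-- ===== VERDICT (by name: the statement is the Claim_ definition above) =====
theorem Minimal_non_faces_spec : Claim_equal_Minimal_non_faces := by
  intro cpx m n vert _ _
  unfold Spec_Minimal_non_faces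
  rw [pvA_eq, pvB_eq]
  exact pvMain cpx (pvPairs n vert) [] (List.replicate n.toNat 0) []
    ⟨by simp, by simp, by simp⟩ (pvPairs_nonneg n vert)
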